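-- pv_equiv track=rewrite | github.com/Kawser-nerd/CLCDSA | Source Codes/CodeJamData/17/04/18.py | add_more_bishops
-- ===== SOURCE A (Python) =====
-- def bishop_hits(N, bishop):
--     hit_positions = set([bishop])
--
--     nw_moves = min(bishop[0], bishop[1])
--     for i in range(1, nw_moves):
--         hit_positions.add((bishop[0] - i, bishop[1] - i))
--     sw_moves = min(N - bishop[0] + 1, bishop[1])
--     for i in range(1, sw_moves):
--         hit_positions.add((bishop[0] + i, bishop[1] - i))
--     ne_moves = min(bishop[0], N - bishop[1] + 1)
--     for i in range(1, ne_moves):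
--         hit_positions.add((bishop[0] - i, bishop[1] + i))
--     se_moves = min(N - bishop[0] + 1, N - bishop[1] + 1)
--     for i in range(1, se_moves):
--         hit_positions.add((bishop[0] + i, bishop[1] + i))
--     return hit_positions
--
-- def add_more_bishops(N, existing_bishops):
--     filled_positions = set()
--     for bishop in existing_bishops:
--         filled_positions = filled_positions.union(bishop_hits(N, bishop))
--
--     added_bishops = set()
--
--     min_bound = 1
--     max_bound = N
--     while min_bound <= max_bound:
--
--         for moving_pos in range(min_bound, max_bound + 1):
--             candidate_bishop = (min_bound, moving_pos)
--             if candidate_bishop not in filled_positions: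
--                 added_bishops.add(candidate_bishop)
--                 filled_positions = filled_positions.union(bishop_hits(N, candidate_bishop))
--             candidate_bishop = (max_bound, moving_pos)
--             if candidate_bishop not in filled_positions:
--                 added_bishops.add(candidate_bishop)
--                 filled_positions = filled_positions.union(bishop_hits(N, candidate_bishop))
--             candidate_bishop = (moving_pos, min_bound)
--             if candidate_bishop not in filled_positions:
--                 added_bishops.add(candidate_bishop)
--                 filled_positions = filled_positions.union(bishop_hits(N, candidate_bishop))
--             candidate_bishop = (moving_pos, max_bound)
--             if candidate_bishop not in filled_positions:
--                 added_bishops.add(candidate_bishop)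
--                 filled_positions = filled_positions.union(bishop_hits(N, candidate_bishop))
--
--         min_bound += 1
--         max_bound -= 1
--     return added_bishops
-- ===== SOURCE B (Python) =====
-- def add_more_bishops(N, existing_bishops):
--     # Coverage tracked per diagonal index (r+c and r-c) instead of per attacked cell,
--     # and the shrinking-spiral candidates are generated up front as one flat list,
--     # then consumed by a single greedy pass.
--     candidates = [cell
--                   for k in range((N + 1) // 2)
--                   for mp in range(1 + k, N - k + 1)
--                   for cell in ((1 + k, mp), (N - k, mp), (mp, 1 + k), (mp, N - k))]
--     covered_sum = {r + c for r, c in existing_bishops}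
--     covered_diff = {r - c for r, c in existing_bishops}
--     added_bishops = set()
--     for r, c in candidates:
--         if (r + c) not in covered_sum and (r - c) not in covered_diff:
--             added_bishops.add((r, c))
--             covered_sum.add(r + c)
--             covered_diff.add(r - c)
--     return added_bishops
-- ===== Notes on version B (the rewrite author's own statement) =====
-- stated objective: faster
-- what changed: B tracks coverage by two sets of diagonal indices (r+c and r-c) instead of A's set of every attacked cell, deleting the per-bishop diagonal-cell enumeration loops, and replaces the shrinking while-loop by generating the spiral candidate list up front and folding one greedy pass over it.
import Mathlib
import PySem

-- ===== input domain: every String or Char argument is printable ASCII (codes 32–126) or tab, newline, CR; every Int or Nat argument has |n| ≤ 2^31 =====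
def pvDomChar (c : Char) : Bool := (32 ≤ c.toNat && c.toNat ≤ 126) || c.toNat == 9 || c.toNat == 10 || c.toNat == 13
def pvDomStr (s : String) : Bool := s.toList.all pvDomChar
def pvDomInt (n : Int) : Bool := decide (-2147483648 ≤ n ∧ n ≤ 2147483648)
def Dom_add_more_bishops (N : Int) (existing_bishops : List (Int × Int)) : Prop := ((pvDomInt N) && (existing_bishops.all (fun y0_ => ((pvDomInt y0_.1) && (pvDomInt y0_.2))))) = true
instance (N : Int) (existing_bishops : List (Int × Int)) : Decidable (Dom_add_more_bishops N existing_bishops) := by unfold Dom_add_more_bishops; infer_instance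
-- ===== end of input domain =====

-- B tracks coverage by two sets of diagonal indices (r+c, r-c) instead of A's set of every
-- attacked cell, and folds one greedy pass over the pre-generated spiral candidate list:
-- the diagonal-cell enumeration loops and the shrinking while-loop disappear.
-- Both Pythons return a set; the ports return its element list in first-insertion order.

-- ===== PORT A =====
def bishop_hits (N : Int) (bishop : Int × Int) : PySem.Set (Int × Int) :=
  let hp : PySem.Set (Int × Int) := PySem.Set.ofList [bishop]
  let hp := (PySem.List.pyRange 1 (min bishop.1 bishop.2) 1).foldl
      (fun s i => PySem.Set.add s (bishop.1 - i, bishop.2 - i)) hp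
  let hp := (PySem.List.pyRange 1 (min (N - bishop.1 + 1) bishop.2) 1).foldl
      (fun s i => PySem.Set.add s (bishop.1 + i, bishop.2 - i)) hp
  let hp := (PySem.List.pyRange 1 (min bishop.1 (N - bishop.2 + 1)) 1).foldl
      (fun s i => PySem.Set.add s (bishop.1 - i, bishop.2 + i)) hp
  (PySem.List.pyRange 1 (min (N - bishop.1 + 1) (N - bishop.2 + 1)) 1).foldl
      (fun s i => PySem.Set.add s (bishop.1 + i, bishop.2 + i)) hp

-- A's filled_positions set is only ever membership-tested, never iterated, so the port
-- holds it as a Std.HashSet: exact for Python's add/union/'in' on this set (a list-backed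
-- set would make the port unevaluable on moderate N); 'filled.union(hits)' is this fold
def unionHits (f : Std.HashSet (Int × Int)) (t : PySem.Set (Int × Int)) :
    Std.HashSet (Int × Int) :=
  t.foldl (fun h y => h.insert y) f

-- one 'if candidate_bishop not in filled_positions: …' block of A (state = (filled, added))
def tryPlaceA (N : Int) (st : Std.HashSet (Int × Int) × PySem.Set (Int × Int))
    (cand : Int × Int) : Std.HashSet (Int × Int) × PySem.Set (Int × Int) :=
  if st.1.contains cand then st
  else (unionHits st.1 (bishop_hits N cand), PySem.Set.add st.2 cand)

-- body of A's 'for moving_pos in range(min_bound, max_bound + 1)'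
def rowA (N mn mx : Int) (st : Std.HashSet (Int × Int) × PySem.Set (Int × Int)) (mp : Int) :
    Std.HashSet (Int × Int) × PySem.Set (Int × Int) :=
  let st := tryPlaceA N st (mn, mp)
  let st := tryPlaceA N st (mx, mp)
  let st := tryPlaceA N st (mp, mn)
  tryPlaceA N st (mp, mx)

-- A's 'while min_bound <= max_bound' loop (fuel-bounded; N.toNat + 1 iterations suffice)
def loopA (fuel : Nat) (N mn mx : Int)
    (st : Std.HashSet (Int × Int) × PySem.Set (Int × Int)) :
    Std.HashSet (Int × Int) × PySem.Set (Int × Int) :=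
  match fuel with
  | 0 => st
  | f + 1 =>
    if mn ≤ mx then
      loopA f N (mn + 1) (mx - 1) ((PySem.List.pyRange mn (mx + 1) 1).foldl (rowA N mn mx) st)
    else st

def add_more_bishops (N : Int) (existing_bishops : List (Int × Int)) : List (Int × Int) :=
  let filled := existing_bishops.foldl (fun f b => unionHits f (bishop_hits N b)) ∅
  (loopA (N.toNat + 1) N 1 N (filled, PySem.Set.empty)).2

-- ===== PORT B =====
-- the flat spiral candidate list of Source B
def candidate_cells (N : Int) : List (Int × Int) :=
  (PySem.List.pyRange 0 (PySem.Int.floordiv (N + 1) 2) 1).flatMap (fun k =>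
    (PySem.List.pyRange (1 + k) (N - k + 1) 1).flatMap (fun mp =>
      [(1 + k, mp), (N - k, mp), (mp, 1 + k), (mp, N - k)]))

-- the greedy step of Source B (state = (covered_sum, covered_diff, added))
def stepB (st : PySem.Set Int × PySem.Set Int × PySem.Set (Int × Int)) (cell : Int × Int) :
    PySem.Set Int × PySem.Set Int × PySem.Set (Int × Int) :=
  if !(PySem.Set.contains st.1 (cell.1 + cell.2))
      && !(PySem.Set.contains st.2.1 (cell.1 - cell.2)) then
    (PySem.Set.add st.1 (cell.1 + cell.2), PySem.Set.add st.2.1 (cell.1 - cell.2),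
      PySem.Set.add st.2.2 cell)
  else st

def add_more_bishops_alt (N : Int) (existing_bishops : List (Int × Int)) : List (Int × Int) :=
  let covered_sum := PySem.Set.ofList (existing_bishops.map (fun b => b.1 + b.2))
  let covered_diff := PySem.Set.ofList (existing_bishops.map (fun b => b.1 - b.2))
  ((candidate_cells N).foldl stepB (covered_sum, covered_diff, PySem.Set.empty)).2.2

-- ===== PRECONDITION & SPEC =====
def Spec_add_more_bishops (N : Int) (existing_bishops : List (Int × Int)) (out : List (Int × Int)) : Prop := out = add_more_bishops_alt N existing_bishops
instance (N : Int) (existing_bishops : List (Int × Int)) (out : List (Int × Int)) : Decidable (Spec_add_more_bishops N existing_bishops out) := by unfold Spec_add_more_bishops; infer_instance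

-- ===== CLAIM (what is proved, stated in full; the proofs are below) =====
def Claim_equal_add_more_bishops : Prop := ∀ (N : Int) (existing_bishops : List (Int × Int)), Dom_add_more_bishops N existing_bishops → Spec_add_more_bishops N existing_bishops (add_more_bishops N existing_bishops)

-- ===== LEMMAS AND PROOFS =====

-- the coupling invariant: on-board cells of A's filled set are exactly the cells whose
-- diagonal index lies in B's covered sets, and the added-bishop lists coincide
def Couple (N : Int) (stA : Std.HashSet (Int × Int) × PySem.Set (Int × Int))
    (stB : PySem.Set Int × PySem.Set Int × PySem.Set (Int × Int)) : Prop :=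
  (∀ r c : Int, 1 ≤ r → r ≤ N → 1 ≤ c → c ≤ N →
      (stA.1.contains (r, c) = true ↔ r + c ∈ stB.1 ∨ r - c ∈ stB.2.1)) ∧ stA.2 = stB.2.2

-- an on-board cell is hit by a bishop (anywhere) iff it shares one of its diagonals
theorem mem_bishop_hits (N b1 b2 r c : Int) (hr1 : 1 ≤ r) (hrN : r ≤ N)
    (hc1 : 1 ≤ c) (hcN : c ≤ N) :
    ((r, c) ∈ bishop_hits N (b1, b2) ↔ r + c = b1 + b2 ∨ r - c = b1 - b2) := by
  simp only [bishop_hits, PySem.Set.mem_foldl_add, PySem.Set.mem_ofList,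
    PySem.List.mem_pyRange_one, List.mem_singleton, Prod.mk.injEq]
  constructor
  · rintro ((((⟨h1, h2⟩ | ⟨i, ⟨hi1, hi2⟩, h1, h2⟩) | ⟨i, ⟨hi1, hi2⟩, h1, h2⟩) |
      ⟨i, ⟨hi1, hi2⟩, h1, h2⟩) | ⟨i, ⟨hi1, hi2⟩, h1, h2⟩) <;> omega
  · rintro (hs | hd)
    · rcases lt_trichotomy r b1 with h | h | h
      · exact Or.inl (Or.inr ⟨b1 - r, ⟨by omega, by omega⟩, by omega, by omega⟩)
      · exact Or.inl (Or.inl (Or.inl (Or.inl ⟨by omega, by omega⟩)))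
      · exact Or.inl (Or.inl (Or.inr ⟨r - b1, ⟨by omega, by omega⟩, by omega, by omega⟩))
    · rcases lt_trichotomy r b1 with h | h | h
      · exact Or.inl (Or.inl (Or.inl (Or.inr ⟨b1 - r, ⟨by omega, by omega⟩, by omega, by omega⟩)))
      · exact Or.inl (Or.inl (Or.inl (Or.inl ⟨by omega, by omega⟩)))
      · exact Or.inr ⟨r - b1, ⟨by omega, by omega⟩, by omega, by omega⟩

theorem contains_unionHits : ∀ (t : List (Int × Int)) (f : Std.HashSet (Int × Int))
    (x : Int × Int), ((unionHits f t).contains x = true ↔ f.contains x = true ∨ x ∈ t) := by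
  intro t
  induction t with
  | nil => simp [unionHits]
  | cons y ys ih =>
    intro f x
    show ((unionHits (f.insert y) ys).contains x = true ↔ _)
    rw [ih]
    simp only [Std.HashSet.contains_insert, Bool.or_eq_true, beq_iff_eq, List.mem_cons]
    tauto

theorem contains_foldl_unionHits (g : Int × Int → PySem.Set (Int × Int)) :
    ∀ (l : List (Int × Int)) (f : Std.HashSet (Int × Int)) (x : Int × Int),
    ((l.foldl (fun f b => unionHits f (g b)) f).contains x = true ↔
      f.contains x = true ∨ ∃ b ∈ l, x ∈ g b) := by
  intro l
  induction l with
  | nil => simp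
  | cons b bs ih =>
    intro f x
    simp only [List.foldl_cons, ih, contains_unionHits, List.mem_cons]
    constructor
    · rintro ((h | h) | ⟨b', hb', h⟩)
      · exact Or.inl h
      · exact Or.inr ⟨b, Or.inl rfl, h⟩
      · exact Or.inr ⟨b', Or.inr hb', h⟩
    · rintro (h | ⟨b', (rfl | hb'), h⟩)
      · exact Or.inl (Or.inl h)
      · exact Or.inl (Or.inr h)
      · exact Or.inr ⟨b', hb', h⟩

theorem tryPlace_couple (N : Int) (stA : Std.HashSet (Int × Int) × PySem.Set (Int × Int))
    (stB : PySem.Set Int × PySem.Set Int × PySem.Set (Int × Int)) (r c : Int)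
    (h : Couple N stA stB) (hr1 : 1 ≤ r) (hrN : r ≤ N) (hc1 : 1 ≤ c) (hcN : c ≤ N) :
    Couple N (tryPlaceA N stA (r, c)) (stepB stB (r, c)) := by
  obtain ⟨hInv, hAdd⟩ := h
  have hcov := hInv r c hr1 hrN hc1 hcN
  by_cases hmem : stA.1.contains (r, c) = true
  · have ha := hmem
    have hB : (!(PySem.Set.contains stB.1 (r + c))
        && !(PySem.Set.contains stB.2.1 (r - c))) = false := by
      rcases hcov.mp hmem with hb | hb <;> simp <;> tauto
    simp only [tryPlaceA, stepB, ha, hB, if_true, Bool.false_eq_true, if_false]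
    exact ⟨hInv, hAdd⟩
  · have hnb : ¬ (r + c ∈ stB.1 ∨ r - c ∈ stB.2.1) := fun hb => hmem (hcov.mpr hb)
    rw [not_or] at hnb
    have ha : stA.1.contains (r, c) = false := by
      rw [Bool.eq_false_iff]; exact hmem
    have h1 : PySem.Set.contains stB.1 (r + c) = false := by
      rw [Bool.eq_false_iff]; intro hh; exact hnb.1 ((PySem.Set.contains_iff _ _).mp hh)
    have h2 : PySem.Set.contains stB.2.1 (r - c) = false := by
      rw [Bool.eq_false_iff]; intro hh; exact hnb.2 ((PySem.Set.contains_iff _ _).mp hh)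
    simp only [tryPlaceA, stepB, ha, h1, h2, Bool.not_false, Bool.and_self,
      Bool.false_eq_true, if_false, if_true]
    refine ⟨?_, ?_⟩
    · intro r' c' hr1' hrN' hc1' hcN'
      show (unionHits stA.1 (bishop_hits N (r, c))).contains (r', c') = true ↔ _
      rw [contains_unionHits, mem_bishop_hits N r c r' c' hr1' hrN' hc1' hcN',
        hInv r' c' hr1' hrN' hc1' hcN']
      show _ ↔ r' + c' ∈ PySem.Set.add stB.1 (r + c) ∨ r' - c' ∈ PySem.Set.add stB.2.1 (r - c)
      rw [PySem.Set.mem_add, PySem.Set.mem_add]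
      tauto
    · show PySem.Set.add stA.2 (r, c) = PySem.Set.add stB.2.2 (r, c)
      rw [hAdd]

theorem row_couple (N mn mx mp : Int) (hmn : 1 ≤ mn) (hmx : mx ≤ N)
    (h1 : mn ≤ mp) (h2 : mp ≤ mx)
    (stA : Std.HashSet (Int × Int) × PySem.Set (Int × Int))
    (stB : PySem.Set Int × PySem.Set Int × PySem.Set (Int × Int))
    (h : Couple N stA stB) :
    Couple N (rowA N mn mx stA mp)
      ([((mn : Int), mp), (mx, mp), (mp, mn), (mp, mx)].foldl stepB stB) := by
  simp only [rowA, List.foldl_cons, List.foldl_nil]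
  apply tryPlace_couple _ _ _ _ _ _ (by omega) (by omega) (by omega) (by omega)
  apply tryPlace_couple _ _ _ _ _ _ (by omega) (by omega) (by omega) (by omega)
  apply tryPlace_couple _ _ _ _ _ _ (by omega) (by omega) (by omega) (by omega)
  exact tryPlace_couple _ _ _ _ _ h (by omega) (by omega) (by omega) (by omega)

theorem rowfold_couple (N mn mx : Int) (hmn : 1 ≤ mn) (hmx : mx ≤ N)
    (l : List Int) (hl : ∀ mp ∈ l, mn ≤ mp ∧ mp ≤ mx) :
    ∀ stA stB, Couple N stA stB →
      Couple N (l.foldl (rowA N mn mx) stA)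
        (l.foldl (fun st mp => [((mn : Int), mp), (mx, mp), (mp, mn), (mp, mx)].foldl stepB st)
          stB) := by
  induction l with
  | nil => intro stA stB h; exact h
  | cons x xs ih =>
    intro stA stB h
    simp only [List.foldl_cons]
    exact ih (fun mp hmp => hl mp (List.mem_cons_of_mem _ hmp)) _ _
      (row_couple N mn mx x hmn hmx (hl x List.mem_cons_self).1
        (hl x List.mem_cons_self).2 stA stB h)

-- per-layer step of B (layer k of the candidate comprehension), folded form
def layerB (N : Int) (st : PySem.Set Int × PySem.Set Int × PySem.Set (Int × Int)) (k : Int) :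
    PySem.Set Int × PySem.Set Int × PySem.Set (Int × Int) :=
  (PySem.List.pyRange (1 + k) (N - k + 1) 1).foldl
    (fun st mp => [((1 + k : Int), mp), (N - k, mp), (mp, 1 + k), (mp, N - k)].foldl stepB st) st

theorem candidate_fold_eq (N : Int)
    (st : PySem.Set Int × PySem.Set Int × PySem.Set (Int × Int)) :
    (candidate_cells N).foldl stepB st =
      (PySem.List.pyRange 0 (PySem.Int.floordiv (N + 1) 2) 1).foldl (layerB N) st := by
  simp only [candidate_cells, List.foldl_flatMap]
  rfl

theorem loop_couple (fuel : Nat) : ∀ (N k : Int)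
    (stA : Std.HashSet (Int × Int) × PySem.Set (Int × Int))
    (stB : PySem.Set Int × PySem.Set Int × PySem.Set (Int × Int)),
    0 ≤ k → (PySem.Int.floordiv (N + 1) 2 - k).toNat ≤ fuel → Couple N stA stB →
    Couple N (loopA fuel N (1 + k) (N - k) stA)
      ((PySem.List.pyRange k (PySem.Int.floordiv (N + 1) 2) 1).foldl (layerB N) stB) := by
  have hK : ∀ N : Int, PySem.Int.floordiv (N + 1) 2 = (N + 1) / 2 := fun N =>
    PySem.Int.floordiv_eq_ediv_of_pos (by omega)
  induction fuel with
  | zero =>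
    intro N k stA stB hk hfuel h
    rw [hK] at hfuel
    rw [PySem.List.pyRange_one_eq_nil (by rw [hK]; omega)]
    exact h
  | succ f ih =>
    intro N k stA stB hk hfuel h
    by_cases hle : 1 + k ≤ N - k
    · rw [PySem.List.pyRange_one_cons (by rw [hK]; omega)]
      simp only [loopA, if_pos hle, List.foldl_cons]
      have hstep : Couple N ((PySem.List.pyRange (1 + k) (N - k + 1) 1).foldl
          (rowA N (1 + k) (N - k)) stA) (layerB N stB k) := by
        apply rowfold_couple N (1 + k) (N - k) (by omega) (by omega)
        · intro mp hmp; rw [PySem.List.mem_pyRange_one] at hmp; omega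
        · exact h
      have := ih N (k + 1) _ _ (by omega) (by rw [hK] at hfuel ⊢; omega) hstep
      simpa [show (1 : Int) + k + 1 = 1 + (k + 1) by ring,
        show N - k - 1 = N - (k + 1) by ring] using this
    · rw [PySem.List.pyRange_one_eq_nil (by rw [hK]; omega)]
      simp only [loopA, if_neg hle]
      exact h

theorem init_couple (N : Int) (existing : List (Int × Int)) :
    Couple N
      (existing.foldl (fun f b => unionHits f (bishop_hits N b)) ∅, PySem.Set.empty)
      (PySem.Set.ofList (existing.map (fun b => b.1 + b.2)),
        PySem.Set.ofList (existing.map (fun b => b.1 - b.2)), PySem.Set.empty) := by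
  refine ⟨?_, rfl⟩
  intro r c hr1 hrN hc1 hcN
  show (existing.foldl (fun f b => unionHits f (bishop_hits N b)) ∅).contains
      (r, c) = true ↔ _
  rw [contains_foldl_unionHits]
  show _ ↔ r + c ∈ PySem.Set.ofList (existing.map (fun b => b.1 + b.2)) ∨
      r - c ∈ PySem.Set.ofList (existing.map (fun b => b.1 - b.2))
  rw [PySem.Set.mem_ofList, PySem.Set.mem_ofList]
  simp only [List.mem_map, Std.HashSet.contains_empty, Bool.false_eq_true, false_or]
  constructor
  · rintro ⟨⟨b1, b2⟩, hb, hmem⟩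
    rcases (mem_bishop_hits N b1 b2 r c hr1 hrN hc1 hcN).mp hmem with hs | hd
    · exact Or.inl ⟨(b1, b2), hb, hs.symm⟩
    · exact Or.inr ⟨(b1, b2), hb, hd.symm⟩
  · rintro (⟨⟨b1, b2⟩, hb, he⟩ | ⟨⟨b1, b2⟩, hb, he⟩) <;>
      exact ⟨(b1, b2), hb, (mem_bishop_hits N b1 b2 r c hr1 hrN hc1 hcN).mpr
        (by first | exact Or.inl he.symm | exact Or.inr he.symm)⟩

-- ===== VERDICT (by name: the statement is the Claim_ definition above) =====
theorem add_more_bishops_spec : Claim_equal_add_more_bishops := by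
  intro N existing _
  unfold Spec_add_more_bishops
  simp only [add_more_bishops, add_more_bishops_alt, candidate_fold_eq]
  have h := loop_couple (N.toNat + 1) N 0
    (existing.foldl (fun f b => unionHits f (bishop_hits N b)) ∅, PySem.Set.empty)
    (PySem.Set.ofList (existing.map (fun b => b.1 + b.2)),
      PySem.Set.ofList (existing.map (fun b => b.1 - b.2)), PySem.Set.empty)
    le_rfl
    (by rw [PySem.Int.floordiv_eq_ediv_of_pos (by omega : (0:Int) < 2)]; omega)
    (init_couple N existing)
  simpa using h.2
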